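-- pv_equiv track=rewrite | github.com/theja-m/Data-Structures-and-Algorithms | Data Structures - Hashtables/HashTable_FrstRecurringCharacter.py | firstRecurringChar
-- ===== SOURCE A (Python) =====
-- def firstRecurringChar(array):
--     collector = set()
--     for item in array:
--         if item not in collector:
--             collector.add(item)
--         else:
--             return item
--     return "Undefined"
-- ===== SOURCE B (Python) =====
-- def firstRecurringChar(array):
--     # For each position i, the nearest later occurrence of array[i] (if any) is a
--     # "second occurrence" candidate; the answer is the element at the minimal candidate index.
--     best = None
--     for i in range(len(array)):
--         head = array[i]
--         rest = array[i+1:]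
--         if head in rest:
--             c = i + 1 + rest.index(head)
--             if best is None or c < best:
--                 best = c
--     return "Undefined" if best is None else array[best]
-- ===== Notes on version B (the rewrite author's own statement) =====
-- stated objective: alternative
-- what changed: Replaces A's single-pass seen-set early-return scan with candidate minimization: for every position compute the index of the next occurrence of its element in the suffix, take the minimal such second-occurrence index over the whole array, and return the element at that index (no seen structure, no early return).
import Mathlib
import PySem

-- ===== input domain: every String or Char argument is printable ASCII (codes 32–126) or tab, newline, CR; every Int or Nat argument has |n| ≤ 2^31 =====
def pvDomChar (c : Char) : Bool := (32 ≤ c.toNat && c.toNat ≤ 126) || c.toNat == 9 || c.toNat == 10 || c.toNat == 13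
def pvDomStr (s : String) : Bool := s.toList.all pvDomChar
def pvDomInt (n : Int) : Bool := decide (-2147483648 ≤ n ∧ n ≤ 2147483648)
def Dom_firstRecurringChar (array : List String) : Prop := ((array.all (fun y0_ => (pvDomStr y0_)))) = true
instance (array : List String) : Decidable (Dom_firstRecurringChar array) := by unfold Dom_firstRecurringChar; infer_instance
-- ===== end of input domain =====

-- B replaces A's seen-set early-return scan by candidate minimization over next-occurrence
-- indices (alternative decomposition, not faster).

-- ===== PORT A =====
def pvGoA (collector : PySem.Set String) : List String → String
  | [] => "Undefined"
  | item :: rest =>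
      if ¬ PySem.Set.contains collector item then
        pvGoA (PySem.Set.add collector item) rest
      else item

def firstRecurringChar (array : List String) : String :=
  pvGoA PySem.Set.empty array

-- ===== PORT B =====
-- loop body of Source B: head = array[i]; rest = array[i+1:]; if head in rest: c = i+1+rest.index(head); best = min
-- (indices are nonnegative Python ints; Nat is exact here; rest.index is guarded by 'head in rest')
def pvStepB (array : List String) (best : Option Nat) (i : Nat) : Option Nat :=
  let head := array.getD i ""
  let rest := array.drop (i + 1)
  if head ∈ rest then
    let c := i + 1 + rest.idxOf head
    match best with
    | none => some c
    | some b => if c < b then some c else some b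
  else best

def firstRecurringChar_alt (array : List String) : String :=
  let best := (List.range array.length).foldl (pvStepB array) none
  match best with
  | none => "Undefined"
  | some j => array.getD j ""

-- ===== PRECONDITION & SPEC =====
def Spec_firstRecurringChar (array : List String) (out : String) : Prop := out = firstRecurringChar_alt array
instance (array : List String) (out : String) : Decidable (Spec_firstRecurringChar array out) := by unfold Spec_firstRecurringChar; infer_instance

-- ===== CLAIM (what is proved, stated in full; the proofs are below) =====
def Claim_equal_firstRecurringChar : Prop := ∀ (array : List String), Dom_firstRecurringChar array → Spec_firstRecurringChar array (firstRecurringChar array)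

-- ===== LEMMAS AND PROOFS =====

-- min of two optional indices (none = no candidate)
def pvOptMin : Option Nat → Option Nat → Option Nat
  | none, b => b
  | some a, none => some a
  | some a, some b => some (Nat.min a b)

-- reference function: index of the first element that already occurred (seen set accumulated in s)
def pvFirstIdx (s : List String) : List String → Option Nat
  | [] => none
  | x :: r => if x ∈ s then some 0 else (pvFirstIdx (x :: s) r).map (· + 1)

-- recursive form of B's fold, with offset δ
def pvH : List String → Nat → Option Nat → Option Nat
  | [], _, acc => acc
  | h :: r, δ, acc =>
      pvH r (δ + 1) (if h ∈ r then pvOptMin acc (some (δ + 1 + r.idxOf h)) else acc)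

theorem pvOptMin_none_right (a : Option Nat) : pvOptMin a none = a := by
  cases a <;> rfl

theorem pvOptMin_assoc (a b c : Option Nat) :
    pvOptMin (pvOptMin a b) c = pvOptMin a (pvOptMin b c) := by
  cases a <;> cases b <;> cases c <;> simp [pvOptMin, Nat.min_assoc]

theorem pvOptMin_map_add (a b : Option Nat) (k : Nat) :
    (pvOptMin a b).map (· + k) = pvOptMin (a.map (· + k)) (b.map (· + k)) := by
  cases a <;> cases b <;> simp [pvOptMin]

theorem pvFirstIdx_congr (xs : List String) :
    ∀ (s t : List String), (∀ y, y ∈ s ↔ y ∈ t) → pvFirstIdx s xs = pvFirstIdx t xs := by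
  induction xs with
  | nil => intro s t _; rfl
  | cons x r ih =>
    intro s t H
    by_cases hx : x ∈ t
    · simp [pvFirstIdx, hx, (H x).mpr hx]
    · have hx' : x ∉ s := fun h => hx ((H x).mp h)
      simp only [pvFirstIdx, if_neg hx, if_neg hx']
      rw [ih (x :: s) (x :: t) (fun y => by simp [H y])]

-- key lemma: adding x to the seen set = minimizing with x's first occurrence index
theorem pvFirstIdx_cons_seen (r : List String) :
    ∀ (s : List String) (x : String),
      pvFirstIdx (x :: s) r =
        pvOptMin (if x ∈ r then some (r.idxOf x) else none) (pvFirstIdx s r) := by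
  induction r with
  | nil => intro s x; simp [pvFirstIdx, pvOptMin]
  | cons y r' ih =>
    intro s x
    by_cases hyx : y = x
    · subst hyx
      have hL : pvFirstIdx (y :: s) (y :: r') = some 0 := by simp [pvFirstIdx]
      have hidx : (y :: r').idxOf y = 0 := by simp
      rw [hL, if_pos (List.mem_cons_self), hidx]
      cases pvFirstIdx s (y :: r') with
      | none => rfl
      | some b => simp [pvOptMin]
    · by_cases hys : y ∈ s
      · have hL : pvFirstIdx (x :: s) (y :: r') = some 0 := by
          simp [pvFirstIdx, List.mem_cons, hys]
        have hR : pvFirstIdx s (y :: r') = some 0 := by simp [pvFirstIdx, hys]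
        rw [hL, hR]
        cases hc : (if x ∈ y :: r' then some ((y :: r').idxOf x) else none) with
        | none => rfl
        | some a => simp [pvOptMin]
      · have hyxs : y ∉ x :: s := by simp [List.mem_cons, hyx, hys]
        have hL : pvFirstIdx (x :: s) (y :: r') = (pvFirstIdx (y :: x :: s) r').map (· + 1) := by
          simp [pvFirstIdx, hyxs]
        have hR : pvFirstIdx s (y :: r') = (pvFirstIdx (y :: s) r').map (· + 1) := by
          simp [pvFirstIdx, hys]
        rw [hL, hR]
        rw [pvFirstIdx_congr r' (y :: x :: s) (x :: y :: s) (fun z => by simp [List.mem_cons]; tauto)]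
        rw [ih (y :: s) x, pvOptMin_map_add]
        congr 1
        by_cases hxr : x ∈ r'
        · have hxcons : x ∈ y :: r' := List.mem_cons.mpr (Or.inr hxr)
          simp [hxr, hxcons, hyx]
        · have hxcons : x ∉ y :: r' := by simp [List.mem_cons, hxr]; exact fun h => hyx h.symm
          simp [hxr, hxcons]

-- A's loop computes the element at pvFirstIdx
theorem pvGoA_eq (xs : List String) :
    ∀ (s t : List String), (∀ y, y ∈ s ↔ y ∈ t) →
      pvGoA s xs =
        (match pvFirstIdx t xs with
         | none => "Undefined"
         | some i => xs.getD i "") := by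
  induction xs with
  | nil => intro s t _; rfl
  | cons item rest ih =>
    intro s t H
    by_cases h : item ∈ t
    · have hs : item ∈ s := (H item).mpr h
      simp [pvGoA, PySem.Set.contains, hs, pvFirstIdx, h, List.getD]
    · have hs : item ∉ s := fun h' => h ((H item).mp h')
      have hadd : PySem.Set.add s item = s ++ [item] := by
        simp [PySem.Set.add, PySem.Set.contains, hs]
      simp only [pvGoA, PySem.Set.contains, pvFirstIdx, if_neg h]
      rw [if_pos (by simpa using hs), hadd]
      rw [ih (s ++ [item]) (item :: t) (fun y => by simp [H y]; tauto)]
      cases pvFirstIdx (item :: t) rest <;> simp [List.getD]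

-- B's fold equals pvH
theorem pvFold_eq_pvH (xs : List String) :
    ∀ (pre : List String) (acc : Option Nat),
      (List.range' pre.length xs.length 1).foldl (pvStepB (pre ++ xs)) acc =
        pvH xs pre.length acc := by
  induction xs with
  | nil => intro pre acc; rfl
  | cons h r ih =>
    intro pre acc
    simp only [List.length_cons]
    rw [List.range'_succ, List.foldl_cons]
    have hget : (pre ++ h :: r).getD pre.length "" = h := by
      simp [List.getD]
    have hdrop : (pre ++ h :: r).drop (pre.length + 1) = r := by
      rw [show pre ++ h :: r = (pre ++ [h]) ++ r by simp]
      rw [show pre.length + 1 = (pre ++ [h]).length by simp]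
      exact List.drop_left
    have hstep : pvStepB (pre ++ h :: r) acc pre.length =
        (if h ∈ r then pvOptMin acc (some (pre.length + 1 + r.idxOf h)) else acc) := by
      simp only [pvStepB, hget, hdrop]
      by_cases hm : h ∈ r
      · simp only [if_pos hm]
        cases acc with
        | none => rfl
        | some b =>
          simp only [pvOptMin]
          split_ifs with hlt <;> simp <;> omega
      · simp [hm]
    rw [hstep]
    have := ih (pre ++ [h]) (if h ∈ r then pvOptMin acc (some (pre.length + 1 + r.idxOf h)) else acc)
    simp only [List.length_append, List.length_cons, List.length_nil] at this ⊢
    rw [show pre ++ h :: r = (pre ++ [h]) ++ r by simp] 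
    simpa [pvH] using this

-- pvH computes the min of acc and the shifted first-dup index
theorem pvH_eq (xs : List String) :
    ∀ (δ : Nat) (acc : Option Nat),
      pvH xs δ acc = pvOptMin acc ((pvFirstIdx [] xs).map (· + δ)) := by
  induction xs with
  | nil => intro δ acc; simp [pvH, pvFirstIdx, pvOptMin_none_right]
  | cons h r ih =>
    intro δ acc
    have hP : pvFirstIdx [] (h :: r) =
        (pvOptMin (if h ∈ r then some (r.idxOf h) else none) (pvFirstIdx [] r)).map (· + 1) := by
      rw [show pvFirstIdx [] (h :: r) = (pvFirstIdx [h] r).map (· + 1) from by simp [pvFirstIdx]]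
      rw [pvFirstIdx_cons_seen r [] h]
    simp only [pvH]
    rw [ih (δ + 1)]
    rw [hP]
    rw [Option.map_map]
    have hfun : ((· + δ) ∘ (· + 1) : Nat → Nat) = (· + (δ + 1)) := by
      funext x; simp; omega
    rw [hfun, pvOptMin_map_add]
    by_cases hm : h ∈ r
    · simp only [if_pos hm, Option.map_some]
      rw [pvOptMin_assoc]
      rw [Nat.add_comm (δ + 1) (List.idxOf h r)]
    · simp [hm, pvOptMin]

-- ===== VERDICT (by name: the statement is the Claim_ definition above) =====
theorem firstRecurringChar_spec : Claim_equal_firstRecurringChar := by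
  intro array _
  unfold Spec_firstRecurringChar firstRecurringChar firstRecurringChar_alt
  have hA := pvGoA_eq array [] [] (fun y => Iff.rfl)
  have hB : (List.range array.length).foldl (pvStepB array) none = pvFirstIdx [] array := by
    have := pvFold_eq_pvH array [] none
    simp only [List.length_nil, List.nil_append] at this
    rw [List.range_eq_range', this, pvH_eq]
    cases hP : pvFirstIdx [] array <;> simp [pvOptMin]
  simp only [PySem.Set.empty] at hA ⊢
  rw [hA, hB]
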